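-- pv_equiv track=rewrite | github.com/ksahlin/IsoCon | modules/functions.py | position_query_to_alignment
-- ===== SOURCE A (Python) =====
-- def position_query_to_alignment(query_aligned, target_aligned, target_alignment_start_position):
--     """
--         input:      0-indexed target positions
--         returns:    target vector is a list of 2*t_len +1 positions to keep insertions between base pairs
--                 list of strings of nucleotides for each position, start position in target vector list, end position in target vector list
--     """
--
--     query_positioned = []
--     target_position = target_alignment_start_position # 0-indexed
--     temp_ins = ""
--     # iterating over alignment positions
--     for p in range(len(target_aligned)):
--         if target_aligned[p] == "-":
--             temp_ins += query_aligned[p]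
--         else:
--             if not temp_ins:
--                 query_positioned.append("-") #[2*target_position] = "-"
--             else:
--                 query_positioned.append(temp_ins)
--                 temp_ins = ""
--
--             query_positioned.append(query_aligned[p])
--
--             target_position += 1
--
--     if not temp_ins:
--         query_positioned.append("-")
--     else:
--         query_positioned.append(temp_ins)
--
--     target_vector_start_position = 2*target_alignment_start_position
--     target_vector_end_position = 2*(target_position-1) + 2
--
--     return query_positioned, target_vector_start_position, target_vector_end_position
-- ===== SOURCE B (Python) =====
-- def position_query_to_alignment(query_aligned, target_aligned, target_alignment_start_position):
--     # gap-run / slice based assembly: scan target a run of gaps at a time,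
--     # emit the insertion slice (or '-') and the base character per run.
--     n = len(target_aligned)
--     out = []
--     bases = 0
--     i = 0
--     while i < n:
--         j = i
--         while j < n and target_aligned[j] == '-':
--             j += 1
--         ins = query_aligned[i:j]
--         out.append(ins if ins else '-')
--         if j < n:
--             out.append(query_aligned[j])
--             bases += 1
--         i = j + 1
--     if i == n:
--         out.append('-')
--     return (out, 2 * target_alignment_start_position,
--             2 * (target_alignment_start_position + bases - 1) + 2)
-- ===== Notes on version B (the rewrite author's own statement) =====
-- stated objective: alternative
-- what changed: A scans the alignment one character at a time while growing a temp_ins accumulator string and flushing it at each base; B scans the target a gap-run at a time (inner while finding the end of the run) and emits the insertion as a single slice query_aligned[i:j] plus the base character, counting bases to compute the end position by formula.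
import Mathlib
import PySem

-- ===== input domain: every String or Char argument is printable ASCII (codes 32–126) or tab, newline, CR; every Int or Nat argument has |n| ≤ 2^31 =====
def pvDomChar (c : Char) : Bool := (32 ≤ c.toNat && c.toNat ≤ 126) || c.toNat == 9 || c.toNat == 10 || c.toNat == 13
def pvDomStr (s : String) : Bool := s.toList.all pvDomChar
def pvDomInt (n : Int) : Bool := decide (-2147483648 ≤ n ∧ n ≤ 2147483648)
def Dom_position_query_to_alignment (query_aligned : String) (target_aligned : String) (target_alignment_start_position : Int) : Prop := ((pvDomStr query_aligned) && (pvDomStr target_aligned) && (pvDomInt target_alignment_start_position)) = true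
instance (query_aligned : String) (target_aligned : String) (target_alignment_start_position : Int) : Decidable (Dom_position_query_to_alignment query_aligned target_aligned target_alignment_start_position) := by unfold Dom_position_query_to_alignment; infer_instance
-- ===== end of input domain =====

-- B replaces A's char-by-char accumulator loop with a gap-run (span/slice) assembly of the
-- positioned query; objective: alternative decomposition, same O(n) cost, return value equal on Pre_.


-- ===== PORT A =====
-- A: for p in range(len(target_aligned)), accumulate insertion chars in temp_ins while
-- target_aligned[p] == '-', flush temp_ins (or '-') plus the query char at each base.
-- Strings are built as List Char and turned into String at the very end (exact on Pre_).
def position_query_to_alignment (query_aligned : String) (target_aligned : String) (target_alignment_start_position : Int) : List String × Int × Int :=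
  let ql := query_aligned.toList
  let tl := target_aligned.toList
  let fin := (PySem.List.pyRange 0 (PySem.Str.len target_aligned)).foldl
    (fun (st : List (List Char) × Int × List Char) p =>
      if PySem.List.pyGetD tl p ' ' = '-' then
        (st.1, st.2.1, st.2.2 ++ [PySem.List.pyGetD ql p ' '])
      else if st.2.2 = [] then
        (st.1 ++ [['-'], [PySem.List.pyGetD ql p ' ']], st.2.1 + 1, [])
      else
        (st.1 ++ [st.2.2, [PySem.List.pyGetD ql p ' ']], st.2.1 + 1, []))
    ([], target_alignment_start_position, [])
  let query_positioned := if fin.2.2 = [] then fin.1 ++ [['-']] else fin.1 ++ [fin.2.2]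
  (query_positioned.map (fun cs => String.ofList cs), 2 * target_alignment_start_position, 2 * (fin.2.1 - 1) + 2)

-- ===== PORT B =====
-- B's outer while loop = recursion on the remaining target suffix; the inner while that finds the
-- end of the gap run = takeWhile; the slice query_aligned[i:j] = take; 'out.append ins or -' etc.
def pqaAltGo (q : List Char) (t : List Char) : List (List Char) × Int :=
  let g := t.takeWhile (fun c => c == '-')
  let ins := q.take g.length
  match hrest : t.drop g.length with
  | [] => ([if ins = [] then ['-'] else ins], 0)
  | _ :: rest' =>
    let pr := pqaAltGo (q.drop (g.length + 1)) rest'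
    ((if ins = [] then ['-'] else ins) :: [PySem.List.pyGetD q (g.length : Int) ' '] :: pr.1, pr.2 + 1)
termination_by t.length
decreasing_by
  have h1 : (t.drop g.length).length = t.length - g.length := List.length_drop
  rw [hrest] at h1
  simp at h1
  omega

def position_query_to_alignment_alt (query_aligned : String) (target_aligned : String) (target_alignment_start_position : Int) : List String × Int × Int :=
  let pr := pqaAltGo query_aligned.toList target_aligned.toList
  (pr.1.map (fun cs => String.ofList cs), 2 * target_alignment_start_position, 2 * (target_alignment_start_position + pr.2 - 1) + 2)

-- ===== PRECONDITION & SPEC =====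
-- A raises IndexError (query_aligned[p]) iff the target string is longer than the query string;
-- Pre_ excludes exactly those inputs (in the caller both aligned strings have equal length).
def Pre_position_query_to_alignment (query_aligned : String) (target_aligned : String) (target_alignment_start_position : Int) : Prop :=
  PySem.Str.len target_aligned ≤ PySem.Str.len query_aligned
instance (query_aligned : String) (target_aligned : String) (target_alignment_start_position : Int) : Decidable (Pre_position_query_to_alignment query_aligned target_aligned target_alignment_start_position) := by unfold Pre_position_query_to_alignment; infer_instance

def pvWitness_position_query_to_alignment : String × String × Int := ("AGGT", "A-C-", 0)

def Spec_position_query_to_alignment (query_aligned : String) (target_aligned : String) (target_alignment_start_position : Int) (out : List String × Int × Int) : Prop := out = position_query_to_alignment_alt query_aligned target_aligned target_alignment_start_position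
instance (query_aligned : String) (target_aligned : String) (target_alignment_start_position : Int) (out : List String × Int × Int) : Decidable (Spec_position_query_to_alignment query_aligned target_aligned target_alignment_start_position out) := by unfold Spec_position_query_to_alignment; infer_instance

-- ===== CLAIM (what is proved, stated in full; the proofs are below) =====
def Claim_equal_position_query_to_alignment : Prop := ∀ (query_aligned : String) (target_aligned : String) (target_alignment_start_position : Int), Dom_position_query_to_alignment query_aligned target_aligned target_alignment_start_position → Pre_position_query_to_alignment query_aligned target_aligned target_alignment_start_position → Spec_position_query_to_alignment query_aligned target_aligned target_alignment_start_position (position_query_to_alignment query_aligned target_aligned target_alignment_start_position)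

-- ===== LEMMAS AND PROOFS =====

-- A's loop body, expressed on the current (target char, query char) pair.
def pqaStepP (st : List (List Char) × Int × List Char) (pr : Char × Char) : List (List Char) × Int × List Char :=
  if pr.1 = '-' then
    (st.1, st.2.1, st.2.2 ++ [pr.2])
  else if st.2.2 = [] then
    (st.1 ++ [['-'], [pr.2]], st.2.1 + 1, [])
  else
    (st.1 ++ [st.2.2, [pr.2]], st.2.1 + 1, [])

-- A's index fold over range(len(target)) equals the fold of pqaStepP over the zipped char lists.
lemma pqa_fold_zip (tl ql : List Char) (h : tl.length ≤ ql.length)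
    (init : List (List Char) × Int × List Char) :
    (PySem.List.pyRange 0 (tl.length : Int)).foldl
      (fun st p =>
        if PySem.List.pyGetD tl p ' ' = '-' then
          (st.1, st.2.1, st.2.2 ++ [PySem.List.pyGetD ql p ' '])
        else if st.2.2 = [] then
          (st.1 ++ [['-'], [PySem.List.pyGetD ql p ' ']], st.2.1 + 1, [])
        else
          (st.1 ++ [st.2.2, [PySem.List.pyGetD ql p ' ']], st.2.1 + 1, []))
      init
    = (tl.zip ql).foldl pqaStepP init := by
  have hzlen : (tl.zip ql).length = tl.length := by simp [List.length_zip]; omega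
  have hcong := PySem.List.foldl_congr_mem (PySem.List.pyRange 0 (tl.length : Int))
      (fun st p =>
        if PySem.List.pyGetD tl p ' ' = '-' then
          (st.1, st.2.1, st.2.2 ++ [PySem.List.pyGetD ql p ' '])
        else if st.2.2 = [] then
          (st.1 ++ [['-'], [PySem.List.pyGetD ql p ' ']], st.2.1 + 1, [])
        else
          (st.1 ++ [st.2.2, [PySem.List.pyGetD ql p ' ']], st.2.1 + 1, []))
      (fun st p => pqaStepP st (PySem.List.pyGetD (tl.zip ql) p (' ', ' '))) init ?_
  · rw [hcong]
    have := PySem.List.foldl_pyRange_zero_pyGetD' (tl.zip ql) (' ', ' ') pqaStepP init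
    rw [hzlen] at this
    exact this
  · intro acc p hp
    dsimp only
    have hb := (PySem.List.mem_pyRange_one (a := 0) (b := (tl.length : Int)) (x := p)).mp hp
    have h0 : 0 ≤ p := hb.1
    have h1 : p < (tl.length : Int) := hb.2
    have h2 : p < (ql.length : Int) := by omega
    have h3 : p < ((tl.zip ql).length : Int) := by rw [List.length_zip]; push_cast; omega
    rw [PySem.List.pyGetD_eq_getElem tl ' ' h0 h1,
        PySem.List.pyGetD_eq_getElem ql ' ' h0 h2,
        PySem.List.pyGetD_eq_getElem (tl.zip ql) (' ', ' ') h0 h3,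
        List.getElem_zip]
    simp [pqaStepP]

-- A run of gap pairs only extends temp_ins with the query characters.
lemma pqa_fold_gaps (ps : List (Char × Char)) (hg : ∀ pr ∈ ps, pr.1 = '-')
    (acc : List (List Char)) (pos : Int) (temp : List Char) :
    ps.foldl pqaStepP (acc, pos, temp) = (acc, pos, temp ++ ps.map Prod.snd) := by
  induction ps generalizing temp with
  | nil => simp
  | cons a ps ih =>
    have ha : a.1 = '-' := hg a (by simp)
    simp only [List.foldl_cons]
    rw [show pqaStepP (acc, pos, temp) a = (acc, pos, temp ++ [a.2]) from by
      simp [pqaStepP, ha]]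
    rw [ih (fun pr hpr => hg pr (by simp [hpr]))]
    simp

-- dropWhile as drop of the takeWhile length (used to align B's slices with takeWhile).
lemma dropWhile_eq_drop_len (l : List Char) (p : Char → Bool) :
    l.dropWhile p = l.drop (l.takeWhile p).length := by
  induction l with
  | nil => simp
  | cons a l ih => by_cases h : p a <;> simp [h, ih]

-- Main invariant: finalizing A's fold started at (acc, pos, "") equals appending B's run output.
lemma pqa_main (n : Nat) (tl ql : List Char) (hn : tl.length ≤ n) (h : tl.length ≤ ql.length)
    (acc : List (List Char)) (pos : Int) :
    (let fin := (tl.zip ql).foldl pqaStepP (acc, pos, ([] : List Char));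
      ((if fin.2.2 = [] then fin.1 ++ [['-']] else fin.1 ++ [fin.2.2]), fin.2.1))
    = (acc ++ (pqaAltGo ql tl).1, pos + (pqaAltGo ql tl).2) := by
  induction n generalizing tl ql acc pos with
  | zero =>
    have htl : tl = [] := List.eq_nil_of_length_eq_zero (by omega)
    subst htl
    simp [pqaAltGo]
  | succ n ih =>
    set g := tl.takeWhile (fun c => c == '-') with hg
    have hgle : g.length ≤ tl.length := by
      simpa using List.IsPrefix.length_le (List.takeWhile_prefix (l := tl) (fun c => c == '-'))
    have hqsplit : ql = ql.take g.length ++ ql.drop g.length := (List.take_append_drop _ _).symm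
    have htksplit : tl = g ++ tl.drop g.length := by
      conv_lhs => rw [← List.takeWhile_append_dropWhile (p := fun c => c == '-') (l := tl)]
      rw [dropWhile_eq_drop_len]
    have htklen : (ql.take g.length).length = g.length := by
      rw [List.length_take]; omega
    have hzip : tl.zip ql = g.zip (ql.take g.length) ++ (tl.drop g.length).zip (ql.drop g.length) := by
      conv_lhs => rw [htksplit, hqsplit]
      exact List.zip_append htklen.symm
    have hgaps : ∀ pr ∈ g.zip (ql.take g.length), pr.1 = '-' := by
      intro pr hpr
      have h1 : pr.1 ∈ g := List.of_mem_zip hpr |>.1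
      have := List.mem_takeWhile_imp h1
      simpa using this
    have hsnd : (g.zip (ql.take g.length)).map Prod.snd = ql.take g.length := by
      rw [List.map_snd_zip]; omega
    rw [hzip, List.foldl_append, pqa_fold_gaps _ hgaps]
    rw [hsnd]
    rw [pqaAltGo]
    simp only [← hg]
    cases hrest : tl.drop g.length with
    | nil =>
      simp only [List.zip_nil_left, List.foldl_nil, List.nil_append]
      split <;> simp
    | cons c rest' =>
      have hdroplen : (tl.drop g.length).length = tl.length - g.length := List.length_drop
      rw [hrest] at hdroplen
      simp only [List.length_cons] at hdroplen
      -- c is not a gap (maximality of takeWhile)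
      have hc : (c == '-') = false := by
        have hdw : tl.dropWhile (fun c => c == '-') = c :: rest' := by
          rw [dropWhile_eq_drop_len, ← hg, hrest]
        have := List.head_dropWhile_not (fun c => c == '-') (l := tl) (by simp [hdw])
        simpa [hdw] using this
      have hgql : g.length < ql.length := by omega
      have hqdrop : ql.drop g.length = ql[g.length] :: ql.drop (g.length + 1) :=
        List.drop_eq_getElem_cons hgql
      rw [hqdrop]
      simp only [List.zip_cons_cons, List.foldl_cons]
      have hstep : pqaStepP (acc, pos, [] ++ ql.take g.length) (c, ql[g.length])
          = (acc ++ [if ql.take g.length = [] then ['-'] else ql.take g.length, [ql[g.length]]],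
             pos + 1, ([] : List Char)) := by
        simp only [pqaStepP, List.nil_append]
        have hc' : ¬ (c = '-') := by simpa using hc
        rw [if_neg hc']
        by_cases he : ql.take g.length = ([] : List Char) <;> simp [he]
      rw [hstep]
      have ihx := ih rest' (ql.drop (g.length + 1)) (by omega)
          (by rw [List.length_drop]; omega)
          (acc ++ [if ql.take g.length = [] then ['-'] else ql.take g.length, [ql[g.length]]])
          (pos + 1)
      simp only at ihx ⊢
      rw [ihx]
      have hget : PySem.List.pyGetD ql (g.length : Int) ' ' = ql[g.length] := by
        rw [PySem.List.pyGetD_eq_getElem ql ' ' (by positivity) (by exact_mod_cast hgql)]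
        simp
      rw [hget]
      simp only [Prod.mk.injEq]
      refine ⟨by simp, by ring⟩
  
-- ===== VERDICT (by name: the statement is the Claim_ definition above) =====
theorem position_query_to_alignment_spec : Claim_equal_position_query_to_alignment := by
  intro q t s _ hpre
  unfold Spec_position_query_to_alignment
  unfold position_query_to_alignment position_query_to_alignment_alt
  have hlen : t.toList.length ≤ q.toList.length := by
    have := hpre
    unfold Pre_position_query_to_alignment at this
    rw [PySem.Str.len_eq, PySem.Str.len_eq] at this
    exact_mod_cast this
  simp only [PySem.Str.len_eq]
  rw [pqa_fold_zip t.toList q.toList hlen]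
  have hmain := pqa_main t.toList.length t.toList q.toList le_rfl hlen [] s
  simp only at hmain
  have h1 := congrArg Prod.fst hmain
  have h2 := congrArg Prod.snd hmain
  simp only at h1 h2
  rw [h1]
  simp [h2]
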